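-- pv_equiv track=rewrite | github.com/mfranzonello/digitalvinyls | music/spotify.py | split_by_uri
-- ===== SOURCE A (Python) =====
-- import itertools
--
-- def split_by_uri(uris, consecutive=4):
--     index_splits = []
--     current_sublist = []
--     start_idx = 0
--
--     for _, group in itertools.groupby(uris):
--         group_list = list(group)
--         end_idx = start_idx + len(group_list) - 1
--
--         if len(group_list) >= consecutive:
--             if current_sublist:
--                 index_splits.append((current_sublist[0], current_sublist[-1]))
--                 current_sublist = []
--             index_splits.append((start_idx, end_idx))
--         else:
--             current_sublist.extend(range(start_idx, end_idx + 1))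
--
--         start_idx = end_idx + 1
--
--     if current_sublist:
--         index_splits.append((current_sublist[0], current_sublist[-1]))
--
--     return index_splits
-- ===== SOURCE B (Python) =====
-- def split_by_uri(uris, consecutive=4):
--     if not uris:
--         return []
--     # pass 1: lengths of the maximal runs of equal values
--     lens = []
--     prev = None
--     for u in uris:
--         if lens and u == prev:
--             lens[-1] += 1
--         else:
--             lens.append(1)
--         prev = u
--     # pass 2: a span boundary falls between two adjacent runs iff either run is long
--     starts = [0]
--     pos = 0
--     for a, b in zip(lens, lens[1:]):
--         pos += a
--         if a >= consecutive or b >= consecutive: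
--             starts.append(pos)
--     # pair each boundary with the next one (exclusive) to form the spans
--     return [(s, e - 1) for s, e in zip(starts, starts[1:] + [len(uris)])]
-- ===== Notes on version B (the rewrite author's own statement) =====
-- stated objective: alternative
-- what changed: A's single groupby state machine that carries a pending index list and flushes it is replaced by a boundary-based construction: a run-length pass, then cut positions computed from adjacent run-length pairs (a boundary iff either neighbour run is long), then spans formed by pairing consecutive cut positions.
import Mathlib
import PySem

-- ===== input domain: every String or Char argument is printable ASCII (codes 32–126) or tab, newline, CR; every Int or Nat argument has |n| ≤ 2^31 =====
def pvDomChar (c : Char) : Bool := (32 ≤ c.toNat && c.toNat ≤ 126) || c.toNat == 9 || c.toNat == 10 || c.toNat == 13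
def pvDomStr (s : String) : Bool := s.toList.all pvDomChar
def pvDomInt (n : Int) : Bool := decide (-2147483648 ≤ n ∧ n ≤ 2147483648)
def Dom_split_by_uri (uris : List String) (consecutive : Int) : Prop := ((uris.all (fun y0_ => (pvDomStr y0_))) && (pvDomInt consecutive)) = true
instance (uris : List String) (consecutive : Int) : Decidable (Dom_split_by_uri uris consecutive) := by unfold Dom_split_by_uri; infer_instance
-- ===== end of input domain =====

-- B replaces A's groupby state machine (pending index list flushed when a long run arrives) by a
-- boundary construction: run lengths first, then cut positions from adjacent run-length pairs
-- (a cut iff either neighbour is long), then spans by pairing consecutive cuts; same cost, different shape.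

-- ===== PORT A =====
-- itertools.groupby over a list of strings: the list of maximal runs of equal elements
def pyGroupby : List String → List (List String)
  | [] => []
  | x :: xs =>
    ((x :: xs.takeWhile (· == x)) : List String) :: pyGroupby (xs.dropWhile (· == x))
  termination_by l => l.length
  decreasing_by
    simp only [List.length_cons]
    exact Nat.lt_succ_of_le (List.length_dropWhile_le _ _)

-- the body of A's for-loop (state: index_splits, current_sublist, start_idx)
def pvStepA (consecutive : Int) (st : List (Int × Int) × List Int × Int)
    (group_list : List String) : List (Int × Int) × List Int × Int :=
  let (index_splits, current_sublist, start_idx) := st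
  let end_idx : Int := start_idx + (group_list.length : Int) - 1
  if (group_list.length : Int) ≥ consecutive then
    let (index_splits, current_sublist) :=
      if current_sublist ≠ [] then
        -- current_sublist is nonempty here, so Python's [0] and [-1] do not raise
        (index_splits ++ [(PySem.List.pyGetD current_sublist 0 0,
                           PySem.List.pyGetD current_sublist (-1) 0)], ([] : List Int))
      else (index_splits, current_sublist)
    (index_splits ++ [(start_idx, end_idx)], current_sublist, end_idx + 1)
  else
    (index_splits, current_sublist ++ PySem.List.pyRange start_idx (end_idx + 1) 1, end_idx + 1)

-- the final 'if current_sublist:' flush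
def pvFinA (st : List (Int × Int) × List Int × Int) : List (Int × Int) :=
  let (index_splits, current_sublist, _) := st
  if current_sublist ≠ [] then
    index_splits ++ [(PySem.List.pyGetD current_sublist 0 0,
                      PySem.List.pyGetD current_sublist (-1) 0)]
  else index_splits

def split_by_uri (uris : List String) (consecutive : Int) : List (Int × Int) :=
  pvFinA ((pyGroupby uris).foldl (pvStepA consecutive) ([], [], 0))

-- ===== PORT B =====
-- 'lens[-1] += 1' : replace the last element by its successor (lens is nonempty in that branch)
def pvIncLast (l : List Int) : List Int := l.dropLast ++ [PySem.List.pyGetD l (-1) 0 + 1]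

-- pass-1 loop body: run-length state (lens, prev)
def pvStepL (st : List Int × Option String) (u : String) : List Int × Option String :=
  let (lens, prev) := st
  (if lens ≠ [] ∧ some u = prev then pvIncLast lens else lens ++ [1], some u)

-- pass-2 loop body: cut-position state (starts, pos); a pair (a, b) of adjacent run lengths
def pvStepS (c : Int) (st : List Int × Int) (p : Int × Int) : List Int × Int :=
  let (starts, pos) := st
  let pos := pos + p.1
  if p.1 ≥ c ∨ p.2 ≥ c then (starts ++ [pos], pos) else (starts, pos)

def split_by_uri_alt (uris : List String) (consecutive : Int) : List (Int × Int) :=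
  if uris = [] then []
  else
    let lens := (uris.foldl pvStepL ([], none)).1
    let starts := ((lens.zip (lens.drop 1)).foldl (pvStepS consecutive) ([0], 0)).1
    (starts.zip (starts.drop 1 ++ [(uris.length : Int)])).map (fun p => (p.1, p.2 - 1))

-- ===== PRECONDITION & SPEC =====
def Spec_split_by_uri (uris : List String) (consecutive : Int) (out : List (Int × Int)) : Prop := out = split_by_uri_alt uris consecutive
instance (uris : List String) (consecutive : Int) (out : List (Int × Int)) : Decidable (Spec_split_by_uri uris consecutive out) := by unfold Spec_split_by_uri; infer_instance

-- ===== CLAIM (what is proved, stated in full; the proofs are below) =====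
def Claim_equal_split_by_uri : Prop := ∀ (uris : List String) (consecutive : Int), Dom_split_by_uri uris consecutive → Spec_split_by_uri uris consecutive (split_by_uri uris consecutive)

-- ===== LEMMAS AND PROOFS =====

-- the run table that A's groups induce, starting at index s
def groupsRuns : List (List String) → Int → List (Int × Int × Int)
  | [], _ => []
  | g :: gs, s => (s, s + (g.length : Int) - 1, (g.length : Int)) :: groupsRuns gs (s + (g.length : Int))

-- reference merge fold over the run table (proof-side mirror of A's decisions)
def pvStep2 (consecutive : Int) (st : List (Int × Int) × Option Int × Int)
    (r : Int × Int × Int) : List (Int × Int) × Option Int × Int :=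
  let (out, lo, hi) := st
  let (s, e, ln) := r
  if ln ≥ consecutive then
    match lo with
    | some l => (out ++ [(l, hi)] ++ [(s, e)], none, hi)
    | none => (out ++ [(s, e)], none, hi)
  else
    match lo with
    | some l => (out, some l, e)
    | none => (out, some s, e)

def pvFin2 (st : List (Int × Int) × Option Int × Int) : List (Int × Int) :=
  let (out, lo, hi) := st
  match lo with
  | some l => out ++ [(l, hi)]
  | none => out

-- the common reference function: spans of the remaining run lengths, with an open span
-- starting at a that already covers the current run [pos, pos + lprev)
def G (c : Int) : Int → Int → Int → List Int → List (Int × Int)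
  | a, pos, lprev, [] => [(a, pos + lprev - 1)]
  | a, pos, lprev, lcur :: rest =>
    if lprev ≥ c ∨ lcur ≥ c then
      (a, pos + lprev - 1) :: G c (pos + lprev) (pos + lprev) lcur rest
    else
      G c a (pos + lprev) lcur rest

-- spans among consecutive cut positions (no closing span)
def prefixSpans : List Int → List (Int × Int)
  | a :: b :: rest => (a, b - 1) :: prefixSpans (b :: rest)
  | _ => []

theorem pyGroupby_ne_nil : ∀ (uris : List String), ∀ g ∈ pyGroupby uris, g ≠ [] := by
  intro uris
  induction uris using pyGroupby.induct with
  | case1 => simp [pyGroupby]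
  | case2 x xs ih =>
    intro g hg
    rw [pyGroupby] at hg
    rcases List.mem_cons.mp hg with h | h
    · simp [h]
    · exact ih g h

theorem head_dropWhile_false (p : String → Bool) (l : List String) : ∀ (t : List String) (y : String),
    l.dropWhile p = y :: t → p y = false := by
  induction l with
  | nil => simp
  | cons a l ih =>
    intro t y h
    rw [List.dropWhile_cons] at h
    split at h
    · exact ih t y h
    · next hpa => cases h; simpa using hpa

-- head and last of a nonempty pyRange, as Python's [0] and [-1]
theorem pyRange_getD_zero (l st : Int) (h : l < st) :
    PySem.List.pyGetD (PySem.List.pyRange l st 1) 0 0 = l := by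
  rw [PySem.List.pyRange_one_cons h, PySem.List.pyGetD_zero_cons]

theorem pyRange_getD_neg_one (l st : Int) (h : l < st) :
    PySem.List.pyGetD (PySem.List.pyRange l st 1) (-1) 0 = st - 1 := by
  have : st = (st - 1) + 1 := by ring
  rw [this, PySem.List.pyRange_one_succ_right (by omega), PySem.List.pyGetD_neg_one_append_singleton]
  omega

-- A's fold over groups equals the merge fold over the induced run table
theorem merge_eq (c : Int) : ∀ (gs : List (List String)), (∀ g ∈ gs, g ≠ []) →
    ∀ (out : List (Int × Int)) (st : Int) (lo : Option Int) (cur : List Int) (hi : Int),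
    (match lo with
     | none => cur = []
     | some l => l < st ∧ hi = st - 1 ∧ cur = PySem.List.pyRange l st 1) →
    pvFinA (gs.foldl (pvStepA c) (out, cur, st)) =
      pvFin2 ((groupsRuns gs st).foldl (pvStep2 c) (out, lo, hi)) := by
  intro gs
  induction gs with
  | nil =>
    intro _ out st lo cur hi hinv
    match lo with
    | none =>
      simp at hinv
      simp [pvFinA, pvFin2, groupsRuns, hinv]
    | some l =>
      obtain ⟨hl, hhi, hcur⟩ := hinv
      have hne : cur ≠ [] := by
        rw [hcur, PySem.List.pyRange_one_cons hl]; simp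
      simp only [List.foldl_nil, groupsRuns, pvFinA, pvFin2]
      rw [if_pos hne, hcur, pyRange_getD_zero _ _ hl, pyRange_getD_neg_one _ _ hl, hhi]
  | cons g gs ih =>
    intro hne out st lo cur hi hinv
    have hg : g ≠ [] := hne g (by simp)
    have hglen : 1 ≤ (g.length : Int) := by
      have : g.length ≠ 0 := fun h => hg (List.length_eq_zero_iff.mp h)
      omega
    have hne' : ∀ g' ∈ gs, g' ≠ [] := fun g' h => hne g' (by simp [h])
    rw [List.foldl_cons, groupsRuns, List.foldl_cons]
    by_cases hbig : (g.length : Int) ≥ c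
    · -- long run
      match lo with
      | none =>
        simp only at hinv
        subst hinv
        have hA : pvStepA c (out, [], st) g
            = (out ++ [(st, st + (g.length : Int) - 1)], [], st + (g.length : Int) - 1 + 1) := by
          simp [pvStepA, hbig]
        have hB : pvStep2 c (out, none, hi) (st, st + (g.length : Int) - 1, (g.length : Int))
            = (out ++ [(st, st + (g.length : Int) - 1)], none, hi) := by
          simp [pvStep2, hbig]
        rw [hA, hB, show st + (g.length : Int) - 1 + 1 = st + (g.length : Int) by ring]
        exact ih hne' _ _ none [] hi rfl
      | some l =>
        obtain ⟨hl, hhi, hcur⟩ := hinv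
        have hcne : cur ≠ [] := by rw [hcur, PySem.List.pyRange_one_cons hl]; simp
        have hA : pvStepA c (out, cur, st) g
            = (out ++ [(l, hi)] ++ [(st, st + (g.length : Int) - 1)], [], st + (g.length : Int) - 1 + 1) := by
          simp only [pvStepA, if_pos hbig, if_pos hcne]
          rw [hcur, pyRange_getD_zero _ _ hl, pyRange_getD_neg_one _ _ hl, ← hhi]
        have hB : pvStep2 c (out, some l, hi) (st, st + (g.length : Int) - 1, (g.length : Int))
            = (out ++ [(l, hi)] ++ [(st, st + (g.length : Int) - 1)], none, hi) := by
          simp [pvStep2, hbig]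
        rw [hA, hB, show st + (g.length : Int) - 1 + 1 = st + (g.length : Int) by ring]
        exact ih hne' _ _ none [] hi rfl
    · -- short run
      have hA : pvStepA c (out, cur, st) g
          = (out, cur ++ PySem.List.pyRange st (st + (g.length : Int) - 1 + 1) 1,
             st + (g.length : Int) - 1 + 1) := by
        simp [pvStepA, hbig]
      match lo with
      | none =>
        simp only at hinv
        subst hinv
        have hB : pvStep2 c (out, none, hi) (st, st + (g.length : Int) - 1, (g.length : Int))
            = (out, some st, st + (g.length : Int) - 1) := by
          simp [pvStep2, hbig]
        rw [hA, hB, show st + (g.length : Int) - 1 + 1 = st + (g.length : Int) by ring]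
        refine ih hne' _ _ (some st) _ _ ?_
        refine ⟨by omega, by ring, ?_⟩
        simp
      | some l =>
        obtain ⟨hl, hhi, hcur⟩ := hinv
        have hB : pvStep2 c (out, some l, hi) (st, st + (g.length : Int) - 1, (g.length : Int))
            = (out, some l, st + (g.length : Int) - 1) := by
          simp [pvStep2, hbig]
        rw [hA, hB, show st + (g.length : Int) - 1 + 1 = st + (g.length : Int) by ring]
        refine ih hne' _ _ (some l) _ _ ?_
        refine ⟨by omega, by ring, ?_⟩
        rw [hcur, ← PySem.List.pyRange_one_append l st (st + (g.length : Int)) (by omega) (by omega)]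

-- the merge fold over the run table, after absorbing the first run, computes G
theorem A_G (c : Int) : ∀ (gs : List (List String)) (out : List (Int × Int)) (a pos lprev h : Int),
    (lprev ≥ c → a = pos) →
    pvFin2 ((groupsRuns gs (pos + lprev)).foldl (pvStep2 c)
      (if lprev ≥ c then (out ++ [(pos, pos + lprev - 1)], none, h)
       else (out, some a, pos + lprev - 1)))
    = out ++ G c a pos lprev (gs.map (fun g => (g.length : Int))) := by
  intro gs
  induction gs with
  | nil =>
    intro out a pos lprev h hinv
    by_cases hb : lprev ≥ c
    · rw [if_pos hb, hinv hb]; simp [groupsRuns, pvFin2, G]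
    · rw [if_neg hb]; simp [groupsRuns, pvFin2, G]
  | cons g gs ih =>
    intro out a pos lprev h hinv
    rw [groupsRuns, List.foldl_cons]
    set lc : Int := (g.length : Int) with hlc
    by_cases hb : lprev ≥ c <;> by_cases hb2 : lc ≥ c
    · rw [if_pos hb]
      have hstep : pvStep2 c (out ++ [(pos, pos + lprev - 1)], none, h)
          (pos + lprev, pos + lprev + lc - 1, lc)
          = ((out ++ [(pos, pos + lprev - 1)]) ++ [(pos + lprev, pos + lprev + lc - 1)], none, h) := by
        simp [pvStep2, hb2]
      rw [hstep]
      have := ih (out ++ [(pos, pos + lprev - 1)]) (pos + lprev) (pos + lprev) lc h (fun _ => rfl)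
      rw [if_pos hb2] at this
      rw [show pos + lprev + lc - 1 = (pos + lprev) + lc - 1 by ring] at *
      rw [this, hinv hb]
      simp [G, hb, List.append_assoc]
      rfl
    · rw [if_pos hb]
      have hstep : pvStep2 c (out ++ [(pos, pos + lprev - 1)], none, h)
          (pos + lprev, pos + lprev + lc - 1, lc)
          = (out ++ [(pos, pos + lprev - 1)], some (pos + lprev), pos + lprev + lc - 1) := by
        simp [pvStep2, hb2]
      rw [hstep]
      have := ih (out ++ [(pos, pos + lprev - 1)]) (pos + lprev) (pos + lprev) lc h (fun _ => rfl)
      rw [if_neg hb2, show (pos + lprev) + lc - 1 = pos + lprev + lc - 1 by ring] at this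
      rw [this, hinv hb]
      simp [G, hb, List.append_assoc]
      rfl
    · rw [if_neg hb]
      have hstep : pvStep2 c (out, some a, pos + lprev - 1)
          (pos + lprev, pos + lprev + lc - 1, lc)
          = ((out ++ [(a, pos + lprev - 1)]) ++ [(pos + lprev, pos + lprev + lc - 1)], none, pos + lprev - 1) := by
        simp [pvStep2, hb2, List.append_assoc]
      rw [hstep]
      have := ih ((out ++ [(a, pos + lprev - 1)])) (pos + lprev) (pos + lprev) lc
        (pos + lprev - 1) (fun _ => rfl)
      rw [if_pos hb2, show (pos + lprev) + lc - 1 = pos + lprev + lc - 1 by ring] at this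
      rw [this]
      simp only [List.map_cons, G]
      rw [if_pos (Or.inr (show ((g.length : ℕ) : ℤ) ≥ c from hb2))]
      simp only [List.append_assoc, List.singleton_append]
      rfl
    · rw [if_neg hb]
      have hstep : pvStep2 c (out, some a, pos + lprev - 1)
          (pos + lprev, pos + lprev + lc - 1, lc)
          = (out, some a, pos + lprev + lc - 1) := by
        simp [pvStep2, hb2]
      rw [hstep]
      have := ih out a (pos + lprev) lc (pos + lprev - 1) (fun hc => absurd hc hb2)
      rw [if_neg hb2, show (pos + lprev) + lc - 1 = pos + lprev + lc - 1 by ring] at this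
      rw [this]
      simp only [List.map_cons, G]
      rw [if_neg (show ¬(lprev ≥ c ∨ ((g.length : ℕ) : ℤ) ≥ c) from by
        push Not; exact ⟨lt_of_not_ge hb, lt_of_not_ge hb2⟩)]

-- 'lens[-1] += 1' really replaces the last element
theorem incLast_append (ls : List Int) (cn : Int) : pvIncLast (ls ++ [cn]) = ls ++ [cn + 1] := by
  unfold pvIncLast
  rw [List.dropLast_concat, PySem.List.pyGetD_neg_one_append_singleton]

-- absorbing a constant run's tail into pass 1
theorem lens_absorb (x : String) : ∀ (g : List String), (∀ y ∈ g, y = x) →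
    ∀ (ls : List Int) (cn : Int),
    g.foldl pvStepL (ls ++ [cn], some x) = (ls ++ [cn + (g.length : Int)], some x) := by
  intro g
  induction g with
  | nil => intro _ ls cn; simp
  | cons y t ih =>
    intro hall ls cn
    have hy : y = x := hall y (by simp)
    subst hy
    have hstep : pvStepL (ls ++ [cn], some y) y = (ls ++ [cn + 1], some y) := by
      simp [pvStepL, incLast_append]
    rw [List.foldl_cons, hstep, ih (fun z hz => hall z (by simp [hz])) ls (cn + 1)]
    simp [List.length_cons]; ring_nf

-- pass 1 computes exactly the run lengths of A's groups
theorem lens_groups (uris : List String) : ∀ (ls : List Int) (p : Option String),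
    (match uris with | [] => True | y :: _ => ls = [] ∨ some y ≠ p) →
    (uris.foldl pvStepL (ls, p)).1 = ls ++ (pyGroupby uris).map (fun g => (g.length : Int)) := by
  induction uris using pyGroupby.induct with
  | case1 => intro ls p _; simp [pyGroupby]
  | case2 x xs ih =>
    intro ls p hp
    have hstep : pvStepL (ls, p) x = (ls ++ [1], some x) := by
      rcases hp with h | h
      · simp [pvStepL, h]
      · simp [pvStepL, h]
    rw [List.foldl_cons, hstep]
    conv_lhs => rw [← List.takeWhile_append_dropWhile (p := (· == x)) (l := xs)]
    rw [List.foldl_append,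
      lens_absorb x (xs.takeWhile (· == x)) (fun y hy => by simpa using List.mem_takeWhile_imp hy) ls 1]
    rcases hr : xs.dropWhile (· == x) with _ | ⟨y, t⟩
    · simp [pyGroupby, hr]
      ring_nf
    · have hyx : (y == x) = false := head_dropWhile_false (· == x) xs t y hr
      have hne : some y ≠ some x := by intro h; cases h; simp at hyx
      rw [← hr, ih (ls ++ [1 + ((xs.takeWhile (· == x)).length : Int)]) (some x) (by rw [hr]; exact Or.inr hne)]
      rw [pyGroupby, hr]
      simp [List.append_assoc]
      ring_nf

-- the zip-based span expression, as in the port of B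
def zs (xs : List Int) (n : Int) : List (Int × Int) :=
  (xs.zip (xs.drop 1 ++ [n])).map (fun p => (p.1, p.2 - 1))

theorem zs_cons2 (a b : Int) (rest : List Int) (n : Int) :
    zs (a :: b :: rest) n = (a, b - 1) :: zs (b :: rest) n := by
  simp [zs]

theorem zs_append_last : ∀ (xs : List Int) (a n : Int),
    zs (xs ++ [a]) n = prefixSpans (xs ++ [a]) ++ [(a, n - 1)] := by
  intro xs
  induction xs with
  | nil => intro a n; simp [zs, prefixSpans]
  | cons x xs ih =>
    intro a n
    rcases xs with _ | ⟨y, t⟩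
    · simp only [List.nil_append, List.cons_append, zs_cons2, prefixSpans]
      simp [zs]
    · rw [show (x :: y :: t) ++ [a] = x :: ((y :: t) ++ [a]) by simp,
        show (y :: t) ++ [a] = y :: (t ++ [a]) by simp, zs_cons2,
        show y :: (t ++ [a]) = (y :: t) ++ [a] by simp, ih]
      simp [prefixSpans]

theorem prefixSpans_concat2 : ∀ (xs : List Int) (a b : Int),
    prefixSpans (xs ++ [a, b]) = prefixSpans (xs ++ [a]) ++ [(a, b - 1)] := by
  intro xs
  induction xs with
  | nil => intro a b; simp [prefixSpans]
  | cons x xs ih =>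
    intro a b
    rcases xs with _ | ⟨y, t⟩
    · simp [prefixSpans]
    · rw [show (x :: y :: t) ++ [a, b] = x :: ((y :: t) ++ [a, b]) by simp,
        show (y :: t) ++ [a, b] = y :: (t ++ [a, b]) by simp]
      rw [show (x :: y :: t) ++ [a] = x :: ((y :: t) ++ [a]) by simp,
        show (y :: t) ++ [a] = y :: (t ++ [a]) by simp]
      simp only [prefixSpans]
      rw [show y :: (t ++ [a, b]) = (y :: t) ++ [a, b] by simp,
        show y :: (t ++ [a]) = (y :: t) ++ [a] by simp, ih]
      simp

-- B's cut fold followed by the zip pairing computes G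
theorem B_G (c : Int) : ∀ (rest : List Int) (acc : List Int) (a pos lprev : Int),
    zs ((((lprev :: rest).zip rest).foldl (pvStepS c) (acc ++ [a], pos)).1)
        (pos + lprev + rest.sum)
      = prefixSpans (acc ++ [a]) ++ G c a pos lprev rest := by
  intro rest
  induction rest with
  | nil =>
    intro acc a pos lprev
    simp only [List.zip_nil_right, List.foldl_nil, List.sum_nil, add_zero, G]
    exact zs_append_last acc a (pos + lprev)
  | cons lcur rest ih =>
    intro acc a pos lprev
    rw [show (lprev :: lcur :: rest).zip (lcur :: rest)
        = (lprev, lcur) :: ((lcur :: rest).zip rest) by simp [List.zip]]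
    rw [List.foldl_cons]
    by_cases hcut : lprev ≥ c ∨ lcur ≥ c
    · have hstep : pvStepS c (acc ++ [a], pos) (lprev, lcur)
          = ((acc ++ [a]) ++ [pos + lprev], pos + lprev) := by
        simp [pvStepS, hcut]
      rw [hstep]
      have := ih (acc ++ [a]) (pos + lprev) (pos + lprev) lcur
      rw [show (pos + lprev) + lcur + rest.sum = pos + lprev + (lcur :: rest).sum by
            simp [List.sum_cons]; ring] at this
      rw [this, show (acc ++ [a]) ++ [pos + lprev] = acc ++ [a, pos + lprev] by simp] at *
      rw [prefixSpans_concat2]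
      simp [G, hcut, List.append_assoc]
    · have hstep : pvStepS c (acc ++ [a], pos) (lprev, lcur) = (acc ++ [a], pos + lprev) := by
        simp [pvStepS]; omega
      rw [hstep]
      have := ih acc a (pos + lprev) lcur
      rw [show (pos + lprev) + lcur + rest.sum = pos + lprev + (lcur :: rest).sum by
            simp [List.sum_cons]; ring] at this
      rw [this]
      have : G c a pos lprev (lcur :: rest) = G c a (pos + lprev) lcur rest := by
        simp [G, hcut]
      rw [this]

-- total length of the groups is the length of the list
theorem sum_len : ∀ (uris : List String),
    ((pyGroupby uris).map (fun g => (g.length : Int))).sum = (uris.length : Int) := by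
  intro uris
  induction uris using pyGroupby.induct with
  | case1 => simp [pyGroupby]
  | case2 x xs ih =>
    rw [pyGroupby]
    simp only [List.map_cons, List.sum_cons, ih]
    have := List.takeWhile_append_dropWhile (p := (· == x)) (l := xs)
    have hlen : (xs.takeWhile (· == x)).length + (xs.dropWhile (· == x)).length = xs.length := by
      rw [← List.length_append, this]
    simp only [List.length_cons]
    push_cast [← hlen]
    ring

-- ===== VERDICT (by name: the statement is the Claim_ definition above) =====
theorem split_by_uri_spec : Claim_equal_split_by_uri := by
  intro uris consecutive _
  unfold Spec_split_by_uri split_by_uri split_by_uri_alt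
  rcases huris : uris with _ | ⟨x, xs⟩
  · simp [pyGroupby, pvFinA]
  · rw [if_neg (by simp)]
    simp only
    rw [lens_groups (x :: xs) [] none (Or.inl rfl), List.nil_append]
    rw [merge_eq consecutive (pyGroupby (x :: xs)) (pyGroupby_ne_nil (x :: xs)) [] 0 none [] 0 rfl]
    rw [pyGroupby]
    set g0 : List String := x :: xs.takeWhile (· == x) with hg0
    set gs : List (List String) := pyGroupby (xs.dropWhile (· == x)) with hgs
    set l0 : Int := (g0.length : Int) with hl0
    -- A side: absorb the first run, then A_G
    rw [groupsRuns, List.foldl_cons]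
    have hfirst : pvStep2 consecutive ([], none, 0) (0, 0 + l0 - 1, l0)
        = (if l0 ≥ consecutive then (([] : List (Int × Int)) ++ [(0, 0 + l0 - 1)], none, 0)
           else ([], some 0, 0 + l0 - 1)) := by
      by_cases hb : l0 ≥ consecutive <;> simp [pvStep2, hb]
    rw [hfirst]
    have hA := A_G consecutive gs [] 0 0 l0 0 (fun _ => rfl)
    rw [show (0 : Int) + l0 = l0 by ring] at hA
    rw [show (0 : Int) + l0 - 1 = l0 - 1 by ring] at *
    rw [zero_add, ← hl0, hA, List.nil_append]
    -- B side: B_G with acc = [], a = 0, pos = 0, lprev = l0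
    have hB := B_G consecutive (gs.map (fun g => (g.length : Int))) [] 0 0 l0
    simp only [zs, List.nil_append] at hB
    have hn : ((x :: xs).length : Int)
        = 0 + l0 + (gs.map (fun g => (g.length : Int))).sum := by
      have := sum_len (x :: xs)
      rw [pyGroupby, List.map_cons, List.sum_cons, ← hg0, ← hgs, ← hl0] at this
      omega
    simp only [List.map_cons, ← hl0, List.drop_succ_cons, List.drop_zero]
    rw [hn, hB]
    simp [prefixSpans]
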